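-- pv_equiv track=rewrite | github.com/soyjubilado/AdventOfCode | 2024/22/prog202422.py | DiffsDict
-- ===== SOURCE A (Python) =====
-- def MixAndPrune(a, b):
--   """Mix and prune."""
--   return (a ^ b) % 16777216
--
-- def NewSecret(s):
--   """Calculate the next secret from the previous one."""
--   mul_64 = MixAndPrune(64 * s, s)
--   div_32 = MixAndPrune(mul_64 // 32, mul_64)
--   mul_2048 = MixAndPrune(2048 * div_32, div_32)
--   return mul_2048
--
-- def DiffsDict(s, n=2000):
--   """Return a dictionary keyed on 4-tuples with the value being the number of
--   bannanas of the first occurence of that 4-tuple sequence.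
--   """
--   prices = [s]
--   for _ in range(n):
--     s = NewSecret(s)
--     prices.append(s % 10)
--
--   diffs = [prices[i] - prices[i-1] for i in range(1, len(prices))]
--
--   diffs_dict = {}
--   for i in range(4, len(diffs)):
--     d = tuple(diffs[i-4:i])
--     if d not in diffs_dict:
--       diffs_dict[d] = prices[i]
--   return diffs_dict
-- ===== SOURCE B (Python) =====
-- def MixAndPrune(a, b):
--   """Mix and prune."""
--   return (a ^ b) % 16777216
--
-- def NewSecret(s):
--   """Calculate the next secret from the previous one."""
--   mul_64 = MixAndPrune(64 * s, s)
--   div_32 = MixAndPrune(mul_64 // 32, mul_64)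
--   mul_2048 = MixAndPrune(2048 * div_32, div_32)
--   return mul_2048
--
-- def DiffsDict(s, n=2000):
--   """One streaming pass: roll a 4-diff window, record first sight of each window."""
--   diffs_dict = {}
--   prev = s
--   window = []
--   for _ in range(n):
--     s = NewSecret(s)
--     price = s % 10
--     if len(window) == 4:
--       diffs_dict.setdefault(tuple(window), prev)
--     window = (window + [price - prev])[-4:]
--     prev = price
--   return diffs_dict
-- ===== Notes on version B (the rewrite author's own statement) =====
-- stated objective: simpler
-- what changed: A materializes the full prices list, then a full diffs list, then scans index windows with slicing; B is a single streaming loop over the n generation steps keeping only the previous price and a rolling 4-diff window, inserting first occurrences on the fly.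
import Mathlib
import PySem

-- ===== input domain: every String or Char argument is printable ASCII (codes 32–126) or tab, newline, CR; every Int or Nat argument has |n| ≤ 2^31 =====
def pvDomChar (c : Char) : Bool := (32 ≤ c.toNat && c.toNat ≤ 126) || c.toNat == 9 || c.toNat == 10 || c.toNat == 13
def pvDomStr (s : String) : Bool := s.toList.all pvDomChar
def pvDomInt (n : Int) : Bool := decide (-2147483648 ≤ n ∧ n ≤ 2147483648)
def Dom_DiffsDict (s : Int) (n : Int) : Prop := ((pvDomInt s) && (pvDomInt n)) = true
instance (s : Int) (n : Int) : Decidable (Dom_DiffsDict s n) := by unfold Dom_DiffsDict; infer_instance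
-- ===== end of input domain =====

-- B fuses A's three passes (prices list, diffs list, windowed dict scan) into one streaming
-- loop with a rolling 4-diff window; objective: simpler (one pass, O(1) rolling state).

-- ===== PORT A =====
-- helpers shared by Source A and Source B (identical source text in both)
def MixAndPrune (a b : Int) : Int := PySem.Int.mod (PySem.Int.bxor a b) 16777216

def NewSecret (s : Int) : Int :=
  let mul_64 := MixAndPrune (64 * s) s
  let div_32 := MixAndPrune (PySem.Int.floordiv mul_64 32) mul_64
  let mul_2048 := MixAndPrune (2048 * div_32) div_32
  mul_2048

def DiffsDict (s : Int) (n : Int) : List (List Int × Int) :=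
  let ps := (PySem.List.pyRange 0 n 1).foldl
      (fun (st : List Int × Int) _ =>
        let s' := NewSecret st.2
        (st.1 ++ [PySem.Int.mod s' 10], s')) ([s], s)
  let prices := ps.1
  let diffs := (PySem.List.pyRange 1 (prices.length : Int) 1).map
      (fun i => PySem.List.pyGetD prices i 0 - PySem.List.pyGetD prices (i - 1) 0)
  (PySem.List.pyRange 4 (diffs.length : Int) 1).foldl
      (fun dd i =>
        let d := PySem.List.slice diffs (some (i - 4)) (some i)
        if dd.any (fun kv => kv.1 == d) then dd
        else dd ++ [(d, PySem.List.pyGetD prices i 0)])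
      []

-- ===== PORT B =====
def DiffsDict_alt (s : Int) (n : Int) : List (List Int × Int) :=
  let st := (PySem.List.pyRange 0 n 1).foldl
      (fun (st : List (List Int × Int) × Int × Int × List Int) _ =>
        let dd := st.1
        let sec := st.2.1
        let prev := st.2.2.1
        let window := st.2.2.2
        let sec' := NewSecret sec
        let price := PySem.Int.mod sec' 10
        let dd' := if window.length == 4 then
            (if dd.any (fun kv => kv.1 == window) then dd else dd ++ [(window, prev)])
          else dd
        let window' := PySem.List.slice (window ++ [price - prev]) (some (-4)) none
        (dd', sec', price, window'))
      ([], s, s, [])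
  st.1

-- ===== PRECONDITION & SPEC =====
def Spec_DiffsDict (s : Int) (n : Int) (out : List (List Int × Int)) : Prop := out = DiffsDict_alt s n
instance (s : Int) (n : Int) (out : List (List Int × Int)) : Decidable (Spec_DiffsDict s n out) := by unfold Spec_DiffsDict; infer_instance

-- ===== CLAIM (what is proved, stated in full; the proofs are below) =====
def Claim_equal_DiffsDict : Prop := ∀ (s : Int) (n : Int), Dom_DiffsDict s n → Spec_DiffsDict s n (DiffsDict s n)

-- ===== LEMMAS AND PROOFS =====

-- reference description: the secret sequence, its prices, diffs, windows and dictionary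
def secr (s : Int) : Nat → Int
  | 0 => s
  | k + 1 => NewSecret (secr s k)

def pr (s : Int) (k : Nat) : Int := if k = 0 then s else PySem.Int.mod (secr s k) 10

def df (s : Int) (k : Nat) : Int := pr s k - pr s (k - 1)

def winf (s : Int) (k : Nat) : List Int := [df s (k - 3), df s (k - 2), df s (k - 1), df s k]

def pricesL (s : Int) (m : Nat) : List Int := (List.range (m + 1)).map (pr s)

def diffsL (s : Int) (m : Nat) : List Int := (List.range m).map (fun j => df s (j + 1))

def ddf (s : Int) : Nat → List (List Int × Int)
  | 0 => []
  | k + 1 =>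
    if 4 ≤ k then
      (let dd := ddf s k
       if dd.any (fun kv => kv.1 == winf s k) then dd else dd ++ [(winf s k, pr s k)])
    else ddf s k

lemma len_diffsL (s : Int) (m : Nat) : (diffsL s m).length = m := by simp [diffsL]

lemma diffsL_succ (s : Int) (k : Nat) : diffsL s (k + 1) = diffsL s k ++ [df s (k + 1)] := by
  simp [diffsL, List.range_succ]

lemma ddf_nil (s : Int) : ∀ k, k ≤ 4 → ddf s k = []
  | 0, _ => rfl
  | k + 1, h => by
    have h4 : ¬ 4 ≤ k := by omega
    simp [ddf, h4, ddf_nil s k (by omega)]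

-- a 4-window read off diffsL is winf
lemma drop_take_diffsL (s : Int) (m k : Nat) (h4 : 4 ≤ k) (hk : k ≤ m) :
    ((diffsL s m).drop (k - 4)).take 4 = winf s k := by
  apply List.ext_getElem
  · simp [diffsL, winf]; omega
  · intro i h1 h2
    have hi : i < 4 := by simpa [winf] using h2
    have hlt : k - 4 + i < m := by omega
    rw [List.getElem_take, List.getElem_drop]
    interval_cases i <;>
      (simp [diffsL, winf]; try (congr 1; omega))

lemma wl_winf (s : Int) (k : Nat) (h4 : 4 ≤ k) :
    (diffsL s k).drop (k - 4) = winf s k := by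
  rw [← drop_take_diffsL s k k h4 (le_refl k)]
  rw [List.take_of_length_le]
  simp [diffsL]; omega

lemma slice_diffsL (s : Int) (m k : Nat) (h4 : 4 ≤ k) (hk : k ≤ m) :
    PySem.List.slice (diffsL s m) (some ((k : Int) - 4)) (some (k : Int)) = winf s k := by
  have e : ((k : Int) - 4) = ((k - 4 : Nat) : Int) := by omega
  rw [e, PySem.List.slice_natCast]
  have e2 : k - (k - 4) = 4 := by omega
  rw [e2, drop_take_diffsL s m k h4 hk]

lemma price_get (s : Int) (m k : Nat) (hk : k ≤ m) :
    PySem.List.pyGetD (pricesL s m) (k : Int) 0 = pr s k := by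
  rw [PySem.List.pyGetD_natCast]
  exact PySem.List.getD_map_range (pr s) (m + 1) k 0 (by omega)

-- A's first pass builds pricesL together with the running secret
lemma foldA (s : Int) (l : List Int) : ∀ k : Nat,
    l.foldl
      (fun (st : List Int × Int) _ =>
        let s' := NewSecret st.2
        (st.1 ++ [PySem.Int.mod s' 10], s')) (pricesL s k, secr s k)
      = (pricesL s (k + l.length), secr s (k + l.length)) := by
  induction l with
  | nil => intro k; simp
  | cons x xs ih =>
    intro k
    rw [List.foldl_cons]
    have hinit : (let s' := NewSecret (pricesL s k, secr s k).2;
        ((pricesL s k, secr s k).1 ++ [PySem.Int.mod s' 10], s'))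
        = (pricesL s (k + 1), secr s (k + 1)) := by
      simp [pricesL, List.range_succ, pr, secr]
    rw [hinit, ih (k + 1)]
    have e : k + (x :: xs).length = k + 1 + xs.length := by
      simp only [List.length_cons]; omega
    rw [e]

-- A's diffs comprehension is diffsL
lemma diffs_eq (s : Int) (m : Nat) :
    (PySem.List.pyRange 1 (((pricesL s m).length : Nat) : Int) 1).map
      (fun i => PySem.List.pyGetD (pricesL s m) i 0 - PySem.List.pyGetD (pricesL s m) (i - 1) 0)
      = diffsL s m := by
  have hl : ((pricesL s m).length : Int) = ((m + 1 : Nat) : Int) := by simp [pricesL]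
  rw [hl, PySem.List.pyRange_one, List.map_map]
  have ht : (((m + 1 : Nat) : Int) - 1).toNat = m := by omega
  rw [ht]
  simp only [diffsL]
  apply List.map_congr_left
  intro j hj
  have hjm : j < m := List.mem_range.mp hj
  have e1 : (1 : Int) + (j : Int) = ((j + 1 : Nat) : Int) := by push_cast; ring
  simp only [Function.comp_apply]
  rw [e1]
  have e2 : ((j + 1 : Nat) : Int) - 1 = ((j : Nat) : Int) := by push_cast; ring
  rw [e2]
  rw [price_get s m (j + 1) (by omega), price_get s m j (by omega)]
  simp [df]

-- A's dictionary loop computes ddf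
lemma foldDA (s : Int) (m : Nat) : ∀ k, k ≤ m →
    (PySem.List.pyRange 4 ((k : Nat) : Int) 1).foldl
      (fun dd i =>
        let d := PySem.List.slice (diffsL s m) (some (i - 4)) (some i)
        if dd.any (fun kv => kv.1 == d) then dd
        else dd ++ [(d, PySem.List.pyGetD (pricesL s m) i 0)])
      []
      = ddf s k := by
  intro k
  induction k with
  | zero =>
    intro _
    have h0 : ((0 : Nat) : Int) ≤ 4 := by norm_num
    rw [PySem.List.pyRange_one_eq_nil h0]
    rfl
  | succ k ih =>
    intro hk1
    by_cases h4 : 4 ≤ k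
    · have hcast : (((k + 1 : Nat)) : Int) = ((k : Nat) : Int) + 1 := by push_cast; ring
      have h4' : (4 : Int) ≤ ((k : Nat) : Int) := by exact_mod_cast h4
      rw [hcast, PySem.List.pyRange_one_succ_right h4',
        List.foldl_append, ih (by omega), List.foldl_cons, List.foldl_nil]
      have hslice := slice_diffsL s m k h4 (by omega)
      have hget := price_get s m k (by omega)
      simp only [hslice, hget]
      by_cases hmem : ((ddf s k).any fun kv => kv.1 == winf s k) = true
      · simp [ddf, h4, hmem]
      · simp [ddf, h4, hmem]
    · have h1 : (((k + 1 : Nat)) : Int) ≤ 4 := by push_cast; omega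
      rw [PySem.List.pyRange_one_eq_nil h1]
      rw [show ddf s (k + 1) = ddf s k from by simp [ddf, h4]]
      rw [ddf_nil s k (by omega)]
      rfl

-- B's single pass: full loop invariant
lemma foldB (s : Int) (l : List Int) : ∀ k : Nat,
    l.foldl
      (fun (st : List (List Int × Int) × Int × Int × List Int) _ =>
        let dd := st.1
        let sec := st.2.1
        let prev := st.2.2.1
        let window := st.2.2.2
        let sec' := NewSecret sec
        let price := PySem.Int.mod sec' 10
        let dd' := if window.length == 4 then
            (if dd.any (fun kv => kv.1 == window) then dd else dd ++ [(window, prev)])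
          else dd
        let window' := PySem.List.slice (window ++ [price - prev]) (some (-4)) none
        (dd', sec', price, window'))
      (ddf s k, secr s k, pr s k, (diffsL s k).drop (k - 4))
      = (ddf s (k + l.length), secr s (k + l.length), pr s (k + l.length),
         (diffsL s (k + l.length)).drop (k + l.length - 4)) := by
  induction l with
  | nil => intro k; simp
  | cons x xs ih =>
    intro k
    have hsec : NewSecret (secr s k) = secr s (k + 1) := rfl
    have hpr : PySem.Int.mod (secr s (k + 1)) 10 = pr s (k + 1) := by simp [pr]
    have hw : (diffsL s k).drop (k - 4) ++ [pr s (k + 1) - pr s k]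
        = (diffsL s (k + 1)).drop (k - 4) := by
      rw [diffsL_succ, List.drop_append_of_le_length (by simp [diffsL])]
      simp [df]
    have hlen : ((diffsL s k).drop (k - 4)).length = k - (k - 4) := by
      simp [diffsL]
    have hdd : (if ((diffsL s k).drop (k - 4)).length == 4 then
          (if (ddf s k).any (fun kv => kv.1 == (diffsL s k).drop (k - 4)) then ddf s k
           else ddf s k ++ [((diffsL s k).drop (k - 4), pr s k)])
        else ddf s k) = ddf s (k + 1) := by
      by_cases h4 : 4 ≤ k
      · rw [wl_winf s k h4]
        have : (winf s k).length == 4 := by simp [winf]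
        simp only [this, if_true]
        simp [ddf, h4]
      · have : (((diffsL s k).drop (k - 4)).length == 4) = false := by
          rw [hlen]; simp; omega
        rw [this]
        simp [ddf, h4]
    have hwin : PySem.List.slice ((diffsL s k).drop (k - 4) ++ [pr s (k + 1) - pr s k])
          (some (-4)) none = (diffsL s (k + 1)).drop (k + 1 - 4) := by
      rw [hw, PySem.List.slice_from_neg_ofNat _ 4 (by norm_num)]
      rw [List.length_drop, len_diffsL, List.drop_drop]
      have e : k - 4 + (k + 1 - (k - 4) - 4) = k + 1 - 4 := by omega
      rw [e]
    rw [List.foldl_cons]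
    have hinit : (let dd := (ddf s k, secr s k, pr s k, (diffsL s k).drop (k - 4)).1;
        let sec := (ddf s k, secr s k, pr s k, (diffsL s k).drop (k - 4)).2.1;
        let prev := (ddf s k, secr s k, pr s k, (diffsL s k).drop (k - 4)).2.2.1;
        let window := (ddf s k, secr s k, pr s k, (diffsL s k).drop (k - 4)).2.2.2;
        let sec' := NewSecret sec;
        let price := PySem.Int.mod sec' 10;
        let dd' := if window.length == 4 then
            (if dd.any (fun kv => kv.1 == window) then dd else dd ++ [(window, prev)])
          else dd;
        let window' := PySem.List.slice (window ++ [price - prev]) (some (-4)) none;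
        (dd', sec', price, window'))
        = (ddf s (k + 1), secr s (k + 1), pr s (k + 1), (diffsL s (k + 1)).drop (k + 1 - 4)) := by
      simp only []
      rw [hsec, hpr, hdd, hwin]
    rw [hinit, ih (k + 1)]
    have e : k + (x :: xs).length = k + 1 + xs.length := by
      simp only [List.length_cons]; omega
    rw [e]

lemma A_eq (s n : Int) : DiffsDict s n = ddf s n.toNat := by
  have hlen : (PySem.List.pyRange 0 n 1).length = n.toNat := by
    rw [PySem.List.length_pyRange_one]; simp
  simp only [DiffsDict]
  rw [show (([s], s) : List Int × Int) = (pricesL s 0, secr s 0) from by simp [pricesL, pr, secr]]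
  rw [foldA s (PySem.List.pyRange 0 n 1) 0, hlen]
  simp only [Nat.zero_add]
  rw [diffs_eq s n.toNat, len_diffsL]
  exact foldDA s n.toNat n.toNat (le_refl _)

lemma B_eq (s n : Int) : DiffsDict_alt s n = ddf s n.toNat := by
  have hlen : (PySem.List.pyRange 0 n 1).length = n.toNat := by
    rw [PySem.List.length_pyRange_one]; simp
  simp only [DiffsDict_alt]
  rw [show (([], s, s, []) : List (List Int × Int) × Int × Int × List Int)
      = (ddf s 0, secr s 0, pr s 0, (diffsL s 0).drop (0 - 4)) from by
    simp [ddf, secr, pr, diffsL]]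
  rw [foldB s (PySem.List.pyRange 0 n 1) 0, hlen]
  simp only [Nat.zero_add]

-- ===== VERDICT (by name: the statement is the Claim_ definition above) =====
theorem DiffsDict_spec : Claim_equal_DiffsDict := by
  intro s n _
  unfold Spec_DiffsDict
  rw [A_eq, B_eq]
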